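-- pv_equiv track=rewrite | github.com/DIG-Network/proof_research | sub-problems/anonymous-quorum-binding/experiments/joint-min-max-sum-product-quadruple-weight-schedules-minimal-n-scan/script.py | cross_shell_collision_at_n
-- ===== SOURCE A (Python) =====
-- from itertools import combinations
-- from math import comb, prod
--
-- def quad(ws: list[int], subset: tuple[int, ...]) -> tuple[int, int, int, int]:
--     vals = [ws[i] for i in subset]
--     return (min(vals), max(vals), sum(vals), prod(vals))
--
-- def cross_shell_collision_at_n(ws: list[int]) -> tuple[bool, tuple[int, int, int, int] | None]:
--     n = len(ws)
--     keys5: set[tuple[int, int, int, int]] = set()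
--     keys6: set[tuple[int, int, int, int]] = set()
--     for comb5 in combinations(range(n), 5):
--         keys5.add(quad(ws, comb5))
--     for comb6 in combinations(range(n), 6):
--         keys6.add(quad(ws, comb6))
--     inter = keys5 & keys6
--     if not inter:
--         return False, None
--     return True, min(inter)
-- ===== SOURCE B (Python) =====
-- def cross_shell_collision_at_n(ws: list[int]) -> tuple[bool, tuple[int, int, int, int] | None]:
--     n = len(ws)
--     keys5: set[tuple[int, int, int, int]] = set()
--     keys6: set[tuple[int, int, int, int]] = set()
--
--     def go(i: int, k: int, mn: int, mx: int, s: int, p: int) -> None: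
--         # k elements already chosen (k >= 1), with running min/max/sum/product
--         if k >= 6:
--             keys6.add((mn, mx, s, p))
--             return
--         if k == 5:
--             keys5.add((mn, mx, s, p))
--         for j in range(i, n):
--             w = ws[j]
--             go(j + 1, k + 1, min(mn, w), max(mx, w), s + w, p * w)
--
--     for j in range(n):
--         w = ws[j]
--         go(j + 1, 1, w, w, w, w)
--
--     inter = keys5 & keys6
--     if not inter:
--         return False, None
--     return True, min(inter)
-- ===== Notes on version B (the rewrite author's own statement) =====
-- stated objective: alternative
-- what changed: B replaces the two itertools.combinations passes with per-subset quad() recomputation by one recursive backtracking search over increasing index choices that carries running (min,max,sum,prod) accumulators and fills both key sets in a single traversal.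
import Mathlib
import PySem

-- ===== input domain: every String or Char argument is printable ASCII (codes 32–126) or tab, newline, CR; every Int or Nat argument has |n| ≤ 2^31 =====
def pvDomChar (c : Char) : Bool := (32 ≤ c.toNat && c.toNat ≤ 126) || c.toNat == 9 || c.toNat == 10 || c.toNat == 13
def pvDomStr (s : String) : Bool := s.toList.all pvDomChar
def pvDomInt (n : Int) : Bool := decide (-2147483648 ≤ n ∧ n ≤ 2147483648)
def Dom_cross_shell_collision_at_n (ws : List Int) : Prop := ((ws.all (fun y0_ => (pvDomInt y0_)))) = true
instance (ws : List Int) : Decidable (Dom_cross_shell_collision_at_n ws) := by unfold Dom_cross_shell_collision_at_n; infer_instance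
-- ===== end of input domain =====

-- B replaces the two itertools.combinations passes and per-subset quad() builds by one recursive
-- backtracking search over increasing index choices carrying running (min,max,sum,prod) accumulators,
-- filling both key sets in a single traversal; objective: alternative (different algorithm).


-- Python's lexicographic '<' on 4-tuples of ints (exact: tuple comparison is lexicographic)
def quadLt (a b : Int × Int × Int × Int) : Bool :=
  decide (a.1 < b.1 ∨ (a.1 = b.1 ∧ (a.2.1 < b.2.1 ∨ (a.2.1 = b.2.1 ∧
    (a.2.2.1 < b.2.2.1 ∨ (a.2.2.1 = b.2.2.1 ∧ a.2.2.2 < b.2.2.2))))))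

-- min of two quads, first argument kept on ties (Python's running min)
def lmin (a b : Int × Int × Int × Int) : Int × Int × Int × Int := if quadLt b a then b else a

-- ===== PORT A =====
-- helper quad: indices come from combinations(range(n)), always in range, so pyGetD is exact;
-- subsets are nonempty (length 5/6), so min/max never raise and the .getD 0 default is never used.
def pvQuad (ws : List Int) (subset : List Int) : Int × Int × Int × Int :=
  let vals := subset.map (fun i => PySem.List.pyGetD ws i 0)
  ((PySem.List.min? vals (fun x => x)).getD 0, (PySem.List.max? vals (fun x => x)).getD 0,
   vals.sum, vals.prod)

-- min(inter) over a set of DISTINCT quads under Python's lexicographic order is iteration-order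
-- independent (the minimal value is unique), so it is ported as a running lex-min over the elements.
def cross_shell_collision_at_n (ws : List Int) : Bool × (Option (Int × Int × Int × Int)) :=
  let n : Int := ws.length
  let keys5 : PySem.Set (Int × Int × Int × Int) :=
    (PySem.List.combinations (PySem.List.pyRange 0 n 1) 5).foldl
      (fun s c => PySem.Set.add s (pvQuad ws c)) PySem.Set.empty
  let keys6 : PySem.Set (Int × Int × Int × Int) :=
    (PySem.List.combinations (PySem.List.pyRange 0 n 1) 6).foldl
      (fun s c => PySem.Set.add s (pvQuad ws c)) PySem.Set.empty
  let inter := PySem.Set.inter keys5 keys6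
  match inter with
  | [] => (false, none)
  | h :: t => (true, some (t.foldl lmin h))

-- ===== PORT B =====
-- recursive backtracking over the next chosen index j ∈ [i, n), k elements already chosen with
-- running accumulators (the Python's 'go'; the mutated keys5/keys6 are passed as the state pair st).
-- Python's 'if k >= 6' guard bounds the recursion: every call increases k, so 6 - k terminates.
def pvGoB (ws : List Int) (n : Int) (i : Int) (k : Nat) (mn mx s p : Int)
    (st : PySem.Set (Int × Int × Int × Int) × PySem.Set (Int × Int × Int × Int)) :
    PySem.Set (Int × Int × Int × Int) × PySem.Set (Int × Int × Int × Int) :=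
  if _h : 6 ≤ k then (st.1, PySem.Set.add st.2 (mn, mx, s, p))
  else
    (PySem.List.pyRange i n 1).foldl
      (fun st2 j =>
        let w := PySem.List.pyGetD ws j 0
        pvGoB ws n (j + 1) (k + 1) (min mn w) (max mx w) (s + w) (p * w) st2)
      (if k = 5 then (PySem.Set.add st.1 (mn, mx, s, p), st.2) else st)
termination_by 6 - k
decreasing_by omega

def cross_shell_collision_at_n_alt (ws : List Int) : Bool × (Option (Int × Int × Int × Int)) :=
  let n : Int := ws.length
  let st :=
    (PySem.List.pyRange 0 n 1).foldl
      (fun st j =>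
        let w := PySem.List.pyGetD ws j 0
        pvGoB ws n (j + 1) 1 w w w w st)
      (PySem.Set.empty, PySem.Set.empty)
  let inter := PySem.Set.inter st.1 st.2
  match inter with
  | [] => (false, none)
  | h :: t => (true, some (t.foldl lmin h))

-- ===== PRECONDITION & SPEC =====
def Spec_cross_shell_collision_at_n (ws : List Int) (out : Bool × (Option (Int × Int × Int × Int))) : Prop := out = cross_shell_collision_at_n_alt ws
instance (ws : List Int) (out : Bool × (Option (Int × Int × Int × Int))) : Decidable (Spec_cross_shell_collision_at_n ws out) := by unfold Spec_cross_shell_collision_at_n; infer_instance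

-- ===== CLAIM (what is proved, stated in full; the proofs are below) =====
def Claim_equal_cross_shell_collision_at_n : Prop := ∀ (ws : List Int), Dom_cross_shell_collision_at_n ws → Spec_cross_shell_collision_at_n ws (cross_shell_collision_at_n ws)

-- ===== LEMMAS AND PROOFS =====

-- 'extend the accumulator a by the further chosen values t' — proof-side description of B's running quads
def pvExt (a : Int × Int × Int × Int) (t : List Int) : Int × Int × Int × Int :=
  (t.foldl min a.1, t.foldl max a.2.1, a.2.2.1 + t.sum, a.2.2.2 * t.prod)

-- the quad of a nonempty value list (proof-side; junk on [])
def pvQuadVals (vals : List Int) : Int × Int × Int × Int :=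
  match vals with
  | [] => (0, 0, 0, 1)
  | v :: t => pvExt (v, v, v, v) t

theorem pvExt_nil (a : Int × Int × Int × Int) : pvExt a [] = a := by
  simp [pvExt]

theorem pvExt_cons (a : Int × Int × Int × Int) (w : Int) (t : List Int) :
    pvExt a (w :: t) = pvExt (min a.1 w, max a.2.1 w, a.2.2.1 + w, a.2.2.2 * w) t := by
  simp [pvExt, add_assoc, mul_assoc]

theorem quadLt_irrefl (a : Int × Int × Int × Int) : quadLt a a = false := by
  simp [quadLt]

theorem quadLt_trans {a b c : Int × Int × Int × Int}
    (h1 : quadLt a b = true) (h2 : quadLt b c = true) : quadLt a c = true := by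
  obtain ⟨a1, a2, a3, a4⟩ := a; obtain ⟨b1, b2, b3, b4⟩ := b; obtain ⟨c1, c2, c3, c4⟩ := c
  simp only [quadLt, decide_eq_true_eq] at *
  omega

theorem quadLt_trans' {a b c : Int × Int × Int × Int}
    (h1 : quadLt b a = false) (h2 : quadLt b c = true) : quadLt a c = true := by
  obtain ⟨a1, a2, a3, a4⟩ := a; obtain ⟨b1, b2, b3, b4⟩ := b; obtain ⟨c1, c2, c3, c4⟩ := c
  simp only [quadLt, decide_eq_true_eq, decide_eq_false_iff_not] at *
  omega

theorem quadLt_eq_of_not {a b : Int × Int × Int × Int}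
    (h1 : quadLt a b = false) (h2 : quadLt b a = false) : a = b := by
  obtain ⟨a1, a2, a3, a4⟩ := a; obtain ⟨b1, b2, b3, b4⟩ := b
  simp only [quadLt, decide_eq_false_iff_not] at *
  simp only [Prod.mk.injEq]
  omega

-- the running lex-min of a nonempty list is a member and no member is below it
theorem foldl_lmin_spec (t : List (Int × Int × Int × Int)) (a : Int × Int × Int × Int) :
    t.foldl lmin a ∈ a :: t ∧ ∀ y ∈ a :: t, quadLt y (t.foldl lmin a) = false := by
  induction t generalizing a with
  | nil => simp [quadLt_irrefl]
  | cons x t ih =>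
    obtain ⟨ihmem, ihmin⟩ := ih (lmin a x)
    simp only [List.foldl_cons]
    have hminlx : quadLt (lmin a x) (t.foldl lmin (lmin a x)) = false := ihmin _ (by simp)
    generalize hM : t.foldl lmin (lmin a x) = m at ihmem ihmin hminlx ⊢
    refine ⟨?_, ?_⟩
    · rcases List.mem_cons.mp ihmem with h | h
      · rw [h]; simp only [lmin]; split_ifs <;> simp
      · simp [h]
    · intro y hy
      simp only [List.mem_cons] at hy
      rcases hy with h | h | h
      · subst h
        by_cases hxa : quadLt x y = true
        · have hx : lmin y x = x := by simp [lmin, hxa]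
          rw [hx] at hminlx
          cases hne : quadLt y m with
          | false => rfl
          | true =>
            exfalso
            have h2 := quadLt_trans hxa hne
            rw [hminlx] at h2
            exact Bool.false_ne_true h2
        · have hx : lmin y x = y := by simp [lmin, hxa]
          rw [hx] at hminlx
          exact hminlx
      · subst h
        by_cases hxa : quadLt y a = true
        · have hx : lmin a y = y := by simp [lmin, hxa]
          rw [hx] at hminlx
          exact hminlx
        · have hxa' : quadLt y a = false := by simpa using hxa
          have hx : lmin a y = a := by simp [lmin, hxa']
          rw [hx] at hminlx
          cases hne : quadLt y m with
          | false => rfl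
          | true =>
            exfalso
            have h2 := quadLt_trans' hxa' hne
            rw [hminlx] at h2
            exact Bool.false_ne_true h2
      · exact ihmin y (by simp [h])

-- both ports end with 'match inter with [] => (False,None) | h::t => (True, min)'; equal membership
-- of the two intersection lists makes the results equal (the minimum is the unique lex-least member)
-- proof-side name for the shared final step of both ports
def pvFin (L : List (Int × Int × Int × Int)) : Bool × Option (Int × Int × Int × Int) :=
  match L with
  | [] => (false, none)
  | h :: t => (true, some (t.foldl lmin h))

theorem match_min_congr (L1 L2 : List (Int × Int × Int × Int))
    (hmem : ∀ y, y ∈ L1 ↔ y ∈ L2) : pvFin L1 = pvFin L2 := by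
  unfold pvFin
  cases L1 with
  | nil =>
    cases L2 with
    | nil => rfl
    | cons h2 t2 => exact absurd ((hmem h2).2 (by simp)) (by simp)
  | cons h1 t1 =>
    cases L2 with
    | nil => exact absurd ((hmem h1).1 (by simp)) (by simp)
    | cons h2 t2 =>
      obtain ⟨m1mem, m1min⟩ := foldl_lmin_spec t1 h1
      obtain ⟨m2mem, m2min⟩ := foldl_lmin_spec t2 h2
      have := quadLt_eq_of_not (m2min _ ((hmem _).1 m1mem)) (m1min _ ((hmem _).2 m2mem))
      simp [this]

-- ===== membership characterisation of B's recursive search =====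

-- pvGoB adds to keys5 (resp. keys6) exactly the quads pvExt acc t over the further choices t,
-- i.e. sublists of ws.drop i of length 5-k (resp. 6-k)
set_option maxHeartbeats 1600000 in
theorem pvGoB_mem (ws : List Int) (f : Nat) :
    ∀ (k : Nat) (i mn mx s p : Int) st (q : Int × Int × Int × Int),
    6 - k ≤ f → 1 ≤ k → k ≤ 6 → 0 ≤ i →
    ((q ∈ (pvGoB ws ws.length i k mn mx s p st).1 ↔ q ∈ st.1 ∨
      (k ≤ 5 ∧ ∃ t, t.Sublist (ws.drop i.toNat) ∧ t.length = 5 - k ∧ q = pvExt (mn, mx, s, p) t)) ∧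
     (q ∈ (pvGoB ws ws.length i k mn mx s p st).2 ↔ q ∈ st.2 ∨
      (∃ t, t.Sublist (ws.drop i.toNat) ∧ t.length = 6 - k ∧ q = pvExt (mn, mx, s, p) t))) := by
  induction f with
  | zero =>
    intro k i mn mx s p st q hf h1 h6 hi
    have hk : k = 6 := by omega
    subst hk
    rw [pvGoB, dif_pos (by norm_num)]
    constructor
    · simp
    · rw [PySem.Set.mem_add]
      constructor
      · rintro (h | h)
        · exact Or.inl h
        · exact Or.inr ⟨[], List.nil_sublist _, rfl, by rw [h, pvExt_nil]⟩
      · rintro (h | ⟨t, hts, htl, hq⟩)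
        · exact Or.inl h
        · have : t = [] := List.eq_nil_of_length_eq_zero htl
          subst this
          rw [pvExt_nil] at hq
          exact Or.inr hq
  | succ f ihf =>
    intro k i mn mx s p st q hf h1 h6 hi
    by_cases hk : 6 ≤ k
    · have hk6 : k = 6 := by omega
      subst hk6
      rw [pvGoB, dif_pos (by norm_num)]
      constructor
      · simp
      · rw [PySem.Set.mem_add]
        constructor
        · rintro (h | h)
          · exact Or.inl h
          · exact Or.inr ⟨[], List.nil_sublist _, rfl, by rw [h, pvExt_nil]⟩
        · rintro (h | ⟨t, hts, htl, hq⟩)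
          · exact Or.inl h
          · have : t = [] := List.eq_nil_of_length_eq_zero htl
            subst this
            rw [pvExt_nil] at hq
            exact Or.inr hq
    · have hk5 : k ≤ 5 := by omega
      rw [pvGoB, dif_neg hk]
      -- the inner 'for j in range(i, n)' loop, by induction on the remaining range
      have inner : ∀ (d : Nat) (i : Int) st2, 0 ≤ i → ((ws.length : Int) - i).toNat ≤ d →
          ((q ∈ ((PySem.List.pyRange i (ws.length : Int) 1).foldl
              (fun st2 j =>
                let w := PySem.List.pyGetD ws j 0
                pvGoB ws ws.length (j + 1) (k + 1) (min mn w) (max mx w) (s + w) (p * w) st2)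
              st2).1 ↔ q ∈ st2.1 ∨
            (k + 1 ≤ 5 ∧ ∃ t, t.Sublist (ws.drop i.toNat) ∧ t.length = 5 - k ∧
              q = pvExt (mn, mx, s, p) t)) ∧
          (q ∈ ((PySem.List.pyRange i (ws.length : Int) 1).foldl
              (fun st2 j =>
                let w := PySem.List.pyGetD ws j 0
                pvGoB ws ws.length (j + 1) (k + 1) (min mn w) (max mx w) (s + w) (p * w) st2)
              st2).2 ↔ q ∈ st2.2 ∨
            (∃ t, t.Sublist (ws.drop i.toNat) ∧ t.length = 6 - k ∧
              q = pvExt (mn, mx, s, p) t))) := by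
        intro d
        induction d with
        | zero =>
          intro i st2 hi0 hd
          have hni : (ws.length : Int) ≤ i := by omega
          rw [PySem.List.pyRange_one_eq_nil hni]
          have hdrop : ws.drop i.toNat = [] := by
            apply List.drop_eq_nil_of_le; omega
          rw [hdrop]
          simp only [List.foldl_nil]
          constructor
          · constructor
            · exact fun h => Or.inl h
            · rintro (h | ⟨_, ⟨t, hts, htl, _⟩⟩)
              · exact h
              · rw [List.sublist_nil] at hts; subst hts; simp at htl; omega
          · constructor
            · exact fun h => Or.inl h
            · rintro (h | ⟨t, hts, htl, _⟩)
              · exact h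
              · rw [List.sublist_nil] at hts; subst hts; simp at htl; omega
        | succ d ihd =>
          intro i st2 hi0 hd
          by_cases hlt : i < (ws.length : Int)
          · rw [PySem.List.pyRange_one_cons hlt]
            simp only [List.foldl_cons]
            have hidx : i.toNat < ws.length := by omega
            have hw : PySem.List.pyGetD ws i 0 = ws[i.toNat]'hidx :=
              PySem.List.pyGetD_eq_getElem ws 0 hi0 (by omega)
            have hdrop : ws.drop i.toNat = ws[i.toNat] :: ws.drop (i.toNat + 1) :=
              List.drop_eq_getElem_cons hidx
            have htn : (i + 1).toNat = i.toNat + 1 := by omega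
            obtain ⟨hg1, hg2⟩ := ihf (k + 1) (i + 1) (min mn (PySem.List.pyGetD ws i 0))
              (max mx (PySem.List.pyGetD ws i 0)) (s + PySem.List.pyGetD ws i 0)
              (p * PySem.List.pyGetD ws i 0) st2 q (by omega) (by omega) (by omega) (by omega)
            obtain ⟨hr1, hr2⟩ := ihd (i + 1)
              (pvGoB ws ws.length (i + 1) (k + 1) (min mn (PySem.List.pyGetD ws i 0))
                (max mx (PySem.List.pyGetD ws i 0)) (s + PySem.List.pyGetD ws i 0)
                (p * PySem.List.pyGetD ws i 0) st2) (by omega) (by omega)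
            rw [htn] at hg1 hg2 hr1 hr2
            constructor
            · rw [hr1, hg1, hdrop]
              constructor
              · rintro ((h | h) | ⟨hk1, t, hts, htl, hq⟩)
                · exact Or.inl h
                · obtain ⟨hk1, t', hts, htl, hq⟩ := h
                  refine Or.inr ⟨hk1, ws[i.toNat] :: t', List.cons_sublist_cons.2 hts, by simp; omega, ?_⟩
                  rw [hq, hw]
                  exact (pvExt_cons (mn, mx, s, p) _ _).symm
                · exact Or.inr ⟨hk1, t, hts.cons _, htl, hq⟩
              · rintro (h | ⟨hk1, t, hts, htl, hq⟩)
                · exact Or.inl (Or.inl h)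
                · rcases List.sublist_cons_iff.1 hts with h' | ⟨r, rfl, hr⟩
                  · exact Or.inr ⟨hk1, t, h', htl, hq⟩
                  · refine Or.inl (Or.inr ⟨hk1, r, hr, by simp at htl; omega, ?_⟩)
                    rw [hq, hw]
                    exact pvExt_cons (mn, mx, s, p) _ _
            · rw [hr2, hg2, hdrop]
              constructor
              · rintro ((h | h) | ⟨t, hts, htl, hq⟩)
                · exact Or.inl h
                · obtain ⟨t', hts, htl, hq⟩ := h
                  refine Or.inr ⟨ws[i.toNat] :: t', List.cons_sublist_cons.2 hts, by simp; omega, ?_⟩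
                  rw [hq, hw]
                  exact (pvExt_cons (mn, mx, s, p) _ _).symm
                · exact Or.inr ⟨t, hts.cons _, htl, hq⟩
              · rintro (h | ⟨t, hts, htl, hq⟩)
                · exact Or.inl (Or.inl h)
                · rcases List.sublist_cons_iff.1 hts with h' | ⟨r, rfl, hr⟩
                  · exact Or.inr ⟨t, h', htl, hq⟩
                  · refine Or.inl (Or.inr ⟨r, hr, by simp at htl; omega, ?_⟩)
                    rw [hq, hw]
                    exact pvExt_cons (mn, mx, s, p) _ _
          · rw [PySem.List.pyRange_one_eq_nil (by omega)]
            have hdrop : ws.drop i.toNat = [] := by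
              apply List.drop_eq_nil_of_le; omega
            rw [hdrop]
            simp only [List.foldl_nil]
            constructor
            · constructor
              · exact fun h => Or.inl h
              · rintro (h | ⟨_, ⟨t, hts, htl, _⟩⟩)
                · exact h
                · rw [List.sublist_nil] at hts; subst hts; simp at htl; omega
            · constructor
              · exact fun h => Or.inl h
              · rintro (h | ⟨t, hts, htl, _⟩)
                · exact h
                · rw [List.sublist_nil] at hts; subst hts; simp at htl; omega
      obtain ⟨hi1, hi2⟩ := inner (((ws.length : Int)) - i).toNat i
        (if k = 5 then (PySem.Set.add st.1 (mn, mx, s, p), st.2) else st) hi le_rfl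
      constructor
      · rw [hi1]
        by_cases hk5' : k = 5
        · subst hk5'
          rw [if_pos rfl]
          simp only [PySem.Set.mem_add]
          constructor
          · rintro ((h | h) | ⟨hk1, _⟩)
            · exact Or.inl h
            · exact Or.inr ⟨le_rfl, [], List.nil_sublist _, rfl, by rw [h, pvExt_nil]⟩
            · omega
          · rintro (h | ⟨_, t, hts, htl, hq⟩)
            · exact Or.inl (Or.inl h)
            · have : t = [] := List.eq_nil_of_length_eq_zero (by omega)
              subst this
              rw [pvExt_nil] at hq
              exact Or.inl (Or.inr hq)
        · rw [if_neg hk5']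
          constructor
          · rintro (h | ⟨hk1, t, hts, htl, hq⟩)
            · exact Or.inl h
            · exact Or.inr ⟨hk5, t, hts, htl, hq⟩
          · rintro (h | ⟨_, t, hts, htl, hq⟩)
            · exact Or.inl h
            · exact Or.inr ⟨by omega, t, hts, htl, hq⟩
      · rw [hi2]
        by_cases hk5' : k = 5
        · subst hk5'
          rw [if_pos rfl]
        · rw [if_neg hk5']

-- the top-level loop 'for j in range(n): go(j+1, 1, w, w, w, w)' collects exactly the quads of the
-- nonempty value sublists of length 5 (resp. 6)
theorem pvTop_mem (ws : List Int) (q : Int × Int × Int × Int) :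
    (q ∈ ((PySem.List.pyRange 0 (ws.length : Int) 1).foldl
        (fun st j =>
          let w := PySem.List.pyGetD ws j 0
          pvGoB ws ws.length (j + 1) 1 w w w w st)
        (PySem.Set.empty, PySem.Set.empty)).1 ↔
      ∃ vals, vals.Sublist ws ∧ vals.length = 5 ∧ q = pvQuadVals vals) ∧
    (q ∈ ((PySem.List.pyRange 0 (ws.length : Int) 1).foldl
        (fun st j =>
          let w := PySem.List.pyGetD ws j 0
          pvGoB ws ws.length (j + 1) 1 w w w w st)
        (PySem.Set.empty, PySem.Set.empty)).2 ↔
      ∃ vals, vals.Sublist ws ∧ vals.length = 6 ∧ q = pvQuadVals vals) := by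
  have top : ∀ (d : Nat) (i : Int) st0, 0 ≤ i → ((ws.length : Int) - i).toNat ≤ d →
      ((q ∈ ((PySem.List.pyRange i (ws.length : Int) 1).foldl
          (fun st j =>
            let w := PySem.List.pyGetD ws j 0
            pvGoB ws ws.length (j + 1) 1 w w w w st) st0).1 ↔ q ∈ st0.1 ∨
        ∃ vals, vals.Sublist (ws.drop i.toNat) ∧ vals.length = 5 ∧ q = pvQuadVals vals) ∧
       (q ∈ ((PySem.List.pyRange i (ws.length : Int) 1).foldl
          (fun st j =>
            let w := PySem.List.pyGetD ws j 0
            pvGoB ws ws.length (j + 1) 1 w w w w st) st0).2 ↔ q ∈ st0.2 ∨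
        ∃ vals, vals.Sublist (ws.drop i.toNat) ∧ vals.length = 6 ∧ q = pvQuadVals vals)) := by
    intro d
    induction d with
    | zero =>
      intro i st0 hi0 hd
      rw [PySem.List.pyRange_one_eq_nil (by omega)]
      have hdrop : ws.drop i.toNat = [] := by apply List.drop_eq_nil_of_le; omega
      rw [hdrop]
      simp only [List.foldl_nil]
      constructor
      · constructor
        · exact fun h => Or.inl h
        · rintro (h | ⟨t, hts, htl, _⟩)
          · exact h
          · rw [List.sublist_nil] at hts; subst hts; simp at htl
      · constructor
        · exact fun h => Or.inl h
        · rintro (h | ⟨t, hts, htl, _⟩)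
          · exact h
          · rw [List.sublist_nil] at hts; subst hts; simp at htl
    | succ d ihd =>
      intro i st0 hi0 hd
      by_cases hlt : i < (ws.length : Int)
      · rw [PySem.List.pyRange_one_cons hlt]
        simp only [List.foldl_cons]
        have hidx : i.toNat < ws.length := by omega
        have hw : PySem.List.pyGetD ws i 0 = ws[i.toNat]'hidx :=
          PySem.List.pyGetD_eq_getElem ws 0 hi0 (by omega)
        have hdrop : ws.drop i.toNat = ws[i.toNat] :: ws.drop (i.toNat + 1) :=
          List.drop_eq_getElem_cons hidx
        have htn : (i + 1).toNat = i.toNat + 1 := by omega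
        obtain ⟨hg1, hg2⟩ := pvGoB_mem ws 5 1 (i + 1) (PySem.List.pyGetD ws i 0)
          (PySem.List.pyGetD ws i 0) (PySem.List.pyGetD ws i 0) (PySem.List.pyGetD ws i 0)
          st0 q (by omega) le_rfl (by omega) (by omega)
        obtain ⟨hr1, hr2⟩ := ihd (i + 1)
          (pvGoB ws ws.length (i + 1) 1 (PySem.List.pyGetD ws i 0) (PySem.List.pyGetD ws i 0)
            (PySem.List.pyGetD ws i 0) (PySem.List.pyGetD ws i 0) st0) (by omega) (by omega)
        rw [htn] at hg1 hg2 hr1 hr2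
        constructor
        · rw [hr1, hg1, hdrop]
          constructor
          · rintro ((h | h) | ⟨t, hts, htl, hq⟩)
            · exact Or.inl h
            · obtain ⟨_, t', hts, htl, hq⟩ := h
              refine Or.inr ⟨ws[i.toNat] :: t', List.cons_sublist_cons.2 hts, by simp; omega, ?_⟩
              rw [hq, hw]
              rfl
            · exact Or.inr ⟨t, hts.cons _, htl, hq⟩
          · rintro (h | ⟨t, hts, htl, hq⟩)
            · exact Or.inl (Or.inl h)
            · rcases List.sublist_cons_iff.1 hts with h' | ⟨r, rfl, hr⟩
              · exact Or.inr ⟨t, h', htl, hq⟩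
              · refine Or.inl (Or.inr ⟨by omega, r, hr, by simp at htl; omega, ?_⟩)
                rw [hq, hw]
                rfl
        · rw [hr2, hg2, hdrop]
          constructor
          · rintro ((h | h) | ⟨t, hts, htl, hq⟩)
            · exact Or.inl h
            · obtain ⟨t', hts, htl, hq⟩ := h
              refine Or.inr ⟨ws[i.toNat] :: t', List.cons_sublist_cons.2 hts, by simp; omega, ?_⟩
              rw [hq, hw]
              rfl
            · exact Or.inr ⟨t, hts.cons _, htl, hq⟩
          · rintro (h | ⟨t, hts, htl, hq⟩)
            · exact Or.inl (Or.inl h)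
            · rcases List.sublist_cons_iff.1 hts with h' | ⟨r, rfl, hr⟩
              · exact Or.inr ⟨t, h', htl, hq⟩
              · refine Or.inl (Or.inr ⟨r, hr, by simp at htl; omega, ?_⟩)
                rw [hq, hw]
                rfl
      · rw [PySem.List.pyRange_one_eq_nil (by omega)]
        have hdrop : ws.drop i.toNat = [] := by apply List.drop_eq_nil_of_le; omega
        rw [hdrop]
        simp only [List.foldl_nil]
        constructor
        · constructor
          · exact fun h => Or.inl h
          · rintro (h | ⟨t, hts, htl, _⟩)
            · exact h
            · rw [List.sublist_nil] at hts; subst hts; simp at htl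
        · constructor
          · exact fun h => Or.inl h
          · rintro (h | ⟨t, hts, htl, _⟩)
            · exact h
            · rw [List.sublist_nil] at hts; subst hts; simp at htl
  obtain ⟨h1, h2⟩ := top ((ws.length : Int) - 0).toNat 0 (PySem.Set.empty, PySem.Set.empty)
    le_rfl le_rfl
  constructor
  · rw [h1]
    simp [PySem.Set.empty]
  · rw [h2]
    simp [PySem.Set.empty]

-- ===== membership characterisation of A's key sets =====

theorem pvQuad_eq_quadVals (ws : List Int) (c : List Int) (hc : c ≠ []) :
    pvQuad ws c = pvQuadVals (c.map (fun i => PySem.List.pyGetD ws i 0)) := by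
  cases c with
  | nil => exact absurd rfl hc
  | cons i t =>
    simp only [pvQuad, List.map_cons, pvQuadVals, pvExt, PySem.List.min?_id_cons,
      PySem.List.max?_id_cons, Option.getD_some, List.sum_cons, List.prod_cons]

theorem pvA_mem (ws : List Int) (r : Nat) (hr : 0 < r) (q : Int × Int × Int × Int) :
    (q ∈ (PySem.List.combinations (PySem.List.pyRange 0 (ws.length : Int) 1) r).foldl
        (fun s c => PySem.Set.add s (pvQuad ws c)) PySem.Set.empty ↔
      ∃ vals, vals.Sublist ws ∧ vals.length = r ∧ q = pvQuadVals vals) := by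
  rw [PySem.Set.mem_foldl_add]
  simp only [PySem.Set.empty, List.not_mem_nil, false_or]
  constructor
  · rintro ⟨c, hc, rfl⟩
    have hlen := PySem.List.length_of_mem_combinations hc
    have hsub := PySem.List.sublist_of_mem_combinations hc
    have hcne : c ≠ [] := by intro h; subst h; simp at hlen; omega
    refine ⟨c.map (fun i => PySem.List.pyGetD ws i 0), ?_, by simp [hlen], pvQuad_eq_quadVals ws c hcne⟩
    have := hsub.map (fun i => PySem.List.pyGetD ws i 0)
    rwa [PySem.List.map_pyGetD_pyRange_zero'] at this
  · rintro ⟨vals, hsub, hlen, rfl⟩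
    have hv : vals ∈ PySem.List.combinations ws r :=
      (PySem.List.mem_combinations_iff ws r vals).2 ⟨hsub, hlen⟩
    rw [← PySem.List.map_pyGetD_pyRange_zero' ws 0,
      PySem.List.combinations_map] at hv
    obtain ⟨c, hc, hceq⟩ := List.mem_map.mp hv
    have hcne : c ≠ [] := by
      intro h; subst h; simp at hceq; subst hceq; simp at hlen; omega
    exact ⟨c, hc, by rw [pvQuad_eq_quadVals ws c hcne, hceq]⟩

-- ===== VERDICT (by name: the statement is the Claim_ definition above) =====
theorem cross_shell_collision_at_n_spec : Claim_equal_cross_shell_collision_at_n := by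
  intro ws _
  unfold Spec_cross_shell_collision_at_n cross_shell_collision_at_n cross_shell_collision_at_n_alt
  show pvFin _ = pvFin _
  apply match_min_congr
  intro q
  simp only [PySem.Set.mem_inter]
  rw [pvA_mem ws 5 (by norm_num), pvA_mem ws 6 (by norm_num),
    (pvTop_mem ws q).1, (pvTop_mem ws q).2]
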